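-- pv_equiv track=rewrite | github.com/HandsomeCoder/leetcode-practice | demonware/valid-time.py | solution
-- ===== SOURCE A (Python) =====
-- def solution(A, B, C, D):
--     def is_valid(arr):
--         a, b, c, d = arr
--         h, m = a * 10 + b, c * 10 + d
--         return 1 if 0 <= h < 24 and 0 <= m < 60 else 0
--
--     def get_permutation(arr, i, result, visited):
--         if i == 4:
--             node = tuple(arr)
--             if node not in visited:
--                 result.append(result[-1] + is_valid(arr))
--                 visited.add(node)
--
--         for j in range(i, 4):
--             arr[i], arr[j] = arr[j], arr[i]
--             get_permutation(arr, i+1, result, visited)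
--             arr[i], arr[j] = arr[j], arr[i]
--
--     digits = [A, B, C, D]
--     result = [0]
--     get_permutation(digits, 0, result, set())
--     return result[-1]
-- ===== SOURCE B (Python) =====
-- def solution(A, B, C, D):
--     ds = [A, B, C, D]
--     seen = set()
--     cnt = 0
--     for i in range(4):
--         for j in range(4):
--             for k in range(4):
--                 for l in range(4):
--                     if len({i, j, k, l}) == 4:
--                         t = (ds[i], ds[j], ds[k], ds[l])
--                         if t not in seen:
--                             seen.add(t)
--                             h = ds[i] * 10 + ds[j]
--                             m = ds[k] * 10 + ds[l]
--                             if 0 <= h < 24 and 0 <= m < 60: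
--                                 cnt += 1
--     return cnt
-- ===== Notes on version B (the rewrite author's own statement) =====
-- stated objective: simpler
-- what changed: Replaces the recursive in-place swap permutation generator with a running-total list by four nested index loops over distinct index quadruples, a visited set and a plain counter.
import Mathlib
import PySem

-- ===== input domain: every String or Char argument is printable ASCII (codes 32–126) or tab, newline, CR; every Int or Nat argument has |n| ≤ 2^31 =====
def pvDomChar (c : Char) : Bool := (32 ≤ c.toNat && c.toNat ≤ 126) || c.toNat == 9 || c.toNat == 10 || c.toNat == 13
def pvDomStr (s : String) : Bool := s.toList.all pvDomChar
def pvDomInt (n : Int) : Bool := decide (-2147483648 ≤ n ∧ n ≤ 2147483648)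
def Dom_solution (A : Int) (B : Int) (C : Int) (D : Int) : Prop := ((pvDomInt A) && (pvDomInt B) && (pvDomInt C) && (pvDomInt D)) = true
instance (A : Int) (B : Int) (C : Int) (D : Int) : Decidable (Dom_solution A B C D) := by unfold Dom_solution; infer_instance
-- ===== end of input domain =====

-- B replaces A's recursive swap-based permutation generator with four nested index
-- loops over distinct index quadruples (plus the same visited-set dedup); same cost,
-- plainer structure (objective: simpler).

-- ===== PORT A =====
-- tuple(arr) for the 4-element list arr (arr always has length 4 here; the default
-- branch is unreachable).
def tup4 (arr : List Int) : Int × Int × Int × Int :=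
  match arr with
  | [a, b, c, d] => (a, b, c, d)
  | _ => (0, 0, 0, 0)

-- is_valid(arr): a,b,c,d = arr; exact for length-4 lists (the only use)
def isValidA (arr : List Int) : Int :=
  match arr with
  | [a, b, c, d] =>
    let h := a * 10 + b
    let m := c * 10 + d
    if (0 ≤ h ∧ h < 24) ∧ (0 ≤ m ∧ m < 60) then 1 else 0
  | _ => 0

-- arr[i], arr[j] = arr[j], arr[i]  (indices always in range here; pySetD/pyGetD are
-- exact for in-range nonnegative indices)
def swapA (arr : List Int) (i j : Nat) : List Int :=
  PySem.List.pySetD (PySem.List.pySetD arr (i : Int) (PySem.List.pyGetD arr (j : Int) 0)) (j : Int) (PySem.List.pyGetD arr (i : Int) 0)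

-- get_permutation: fuel = 4 - i bounds the recursion (range(i,4) has 4-i elements);
-- arr is immutable here, so the swap-back of the Python is the identity.
def getPermA : Nat → List Int → Nat → List Int × PySem.Set (Int × Int × Int × Int) → List Int × PySem.Set (Int × Int × Int × Int)
  | fuel, arr, i, (result, visited) =>
    let st :=
      if i = 4 then
        let node := tup4 arr
        if PySem.Set.contains visited node then (result, visited)
        else (result ++ [(PySem.List.pyGetD result (-1) 0) + isValidA arr], PySem.Set.add visited node)
      else (result, visited)
    match fuel with
    | 0 => st
    | fuel + 1 =>
      (List.range' i (fuel + 1)).foldl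
        (fun st j => getPermA fuel (swapA arr i j) (i + 1) st) st

def solution (A : Int) (B : Int) (C : Int) (D : Int) : Int :=
  let digits := [A, B, C, D]
  let result := (getPermA 4 digits 0 ([0], PySem.Set.empty)).1
  PySem.List.pyGetD result (-1) 0

-- ===== PORT B =====
-- one step of B's innermost body
def stepB (ds : List Int) (i j k l : Nat) (st : PySem.Set (Int × Int × Int × Int) × Int) : PySem.Set (Int × Int × Int × Int) × Int :=
  if (PySem.Set.len (PySem.Set.ofList [i, j, k, l])) = 4 then
    let t := (PySem.List.pyGetD ds (i : Int) 0, PySem.List.pyGetD ds (j : Int) 0,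
              PySem.List.pyGetD ds (k : Int) 0, PySem.List.pyGetD ds (l : Int) 0)
    if PySem.Set.contains st.1 t then st
    else
      let seen := PySem.Set.add st.1 t
      let h := PySem.List.pyGetD ds (i : Int) 0 * 10 + PySem.List.pyGetD ds (j : Int) 0
      let m := PySem.List.pyGetD ds (k : Int) 0 * 10 + PySem.List.pyGetD ds (l : Int) 0
      if (0 ≤ h ∧ h < 24) ∧ (0 ≤ m ∧ m < 60) then (seen, st.2 + 1) else (seen, st.2)
  else st

def solution_alt (A : Int) (B : Int) (C : Int) (D : Int) : Int :=
  let ds := [A, B, C, D]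
  let r := List.range 4
  (r.foldl (fun st i =>
    r.foldl (fun st j =>
      r.foldl (fun st k =>
        r.foldl (fun st l => stepB ds i j k l st) st) st) st)
    (PySem.Set.empty, 0)).2

-- ===== PRECONDITION & SPEC =====
def Spec_solution (A : Int) (B : Int) (C : Int) (D : Int) (out : Int) : Prop := out = solution_alt A B C D
instance (A : Int) (B : Int) (C : Int) (D : Int) (out : Int) : Decidable (Spec_solution A B C D out) := by unfold Spec_solution; infer_instance

-- ===== CLAIM (what is proved, stated in full; the proofs are below) =====
def Claim_equal_solution : Prop := ∀ (A : Int) (B : Int) (C : Int) (D : Int), Dom_solution A B C D → Spec_solution A B C D (solution A B C D)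

-- ===== LEMMAS AND PROOFS =====

-- the leaf index-quadruples of A's swap recursion, in visit order
def idxA : List (Nat × Nat × Nat × Nat) :=
  [(0, 1, 2, 3), (0, 1, 3, 2), (0, 2, 1, 3), (0, 2, 3, 1), (0, 3, 2, 1), (0, 3, 1, 2), (1, 0, 2, 3), (1, 0, 3, 2), (1, 2, 0, 3), (1, 2, 3, 0), (1, 3, 2, 0), (1, 3, 0, 2), (2, 1, 0, 3), (2, 1, 3, 0), (2, 0, 1, 3), (2, 0, 3, 1), (2, 3, 0, 1), (2, 3, 1, 0), (3, 1, 2, 0), (3, 1, 0, 2), (3, 2, 1, 0), (3, 2, 0, 1), (3, 0, 2, 1), (3, 0, 1, 2)]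

-- the index-quadruples B's nested loops keep, in lexicographic order
def idxB : List (Nat × Nat × Nat × Nat) :=
  [(0, 1, 2, 3), (0, 1, 3, 2), (0, 2, 1, 3), (0, 2, 3, 1), (0, 3, 1, 2), (0, 3, 2, 1), (1, 0, 2, 3), (1, 0, 3, 2), (1, 2, 0, 3), (1, 2, 3, 0), (1, 3, 0, 2), (1, 3, 2, 0), (2, 0, 1, 3), (2, 0, 3, 1), (2, 1, 0, 3), (2, 1, 3, 0), (2, 3, 0, 1), (2, 3, 1, 0), (3, 0, 1, 2), (3, 0, 2, 1), (3, 1, 0, 2), (3, 1, 2, 0), (3, 2, 0, 1), (3, 2, 1, 0)]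

def pickL (A B C D : Int) (q : Nat × Nat × Nat × Nat) : List Int :=
  [[A, B, C, D].getD q.1 0, [A, B, C, D].getD q.2.1 0, [A, B, C, D].getD q.2.2.1 0, [A, B, C, D].getD q.2.2.2 0]

def pickT (A B C D : Int) (q : Nat × Nat × Nat × Nat) : Int × Int × Int × Int :=
  tup4 (pickL A B C D q)

def isValidT (t : Int × Int × Int × Int) : Int :=
  if (0 ≤ t.1 * 10 + t.2.1 ∧ t.1 * 10 + t.2.1 < 24) ∧ (0 ≤ t.2.2.1 * 10 + t.2.2.2 ∧ t.2.2.1 * 10 + t.2.2.2 < 60) then 1 else 0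

def leafStep (st : List Int × PySem.Set (Int × Int × Int × Int)) (arr : List Int) :
    List Int × PySem.Set (Int × Int × Int × Int) :=
  if PySem.Set.contains st.2 (tup4 arr) then st
  else (st.1 ++ [(PySem.List.pyGetD st.1 (-1) 0) + isValidA arr], PySem.Set.add st.2 (tup4 arr))

def gstep (st : PySem.Set (Int × Int × Int × Int) × Int) (arr : List Int) :
    PySem.Set (Int × Int × Int × Int) × Int :=
  if PySem.Set.contains st.1 (tup4 arr) then st
  else (PySem.Set.add st.1 (tup4 arr), st.2 + isValidA arr)

def hstep (st : PySem.Set (Int × Int × Int × Int) × Int) (t : Int × Int × Int × Int) :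
    PySem.Set (Int × Int × Int × Int) × Int :=
  if PySem.Set.contains st.1 t then st
  else (PySem.Set.add st.1 t, st.2 + isValidT t)

-- unfolding lemmas for A's bounded recursion (one per depth)
theorem uleaf (arr : List Int) (st : List Int × PySem.Set (Int × Int × Int × Int)) :
    getPermA 0 arr 4 st = leafStep st arr := by
  obtain ⟨res, vis⟩ := st
  rw [getPermA]
  norm_num [leafStep]

theorem u1 (arr : List Int) (st : List Int × PySem.Set (Int × Int × Int × Int)) :
    getPermA 1 arr 3 st = getPermA 0 (swapA arr 3 3) 4 st := by
  obtain ⟨res, vis⟩ := st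
  conv_lhs => rw [getPermA]
  norm_num [List.range', List.foldl_cons, List.foldl_nil]

theorem u2 (arr : List Int) (st : List Int × PySem.Set (Int × Int × Int × Int)) :
    getPermA 2 arr 2 st = getPermA 1 (swapA arr 2 3) 3 (getPermA 1 (swapA arr 2 2) 3 st) := by
  obtain ⟨res, vis⟩ := st
  rw [getPermA]
  norm_num [List.range', List.foldl_cons, List.foldl_nil]

theorem u3 (arr : List Int) (st : List Int × PySem.Set (Int × Int × Int × Int)) :
    getPermA 3 arr 1 st = getPermA 2 (swapA arr 1 3) 2 (getPermA 2 (swapA arr 1 2) 2 (getPermA 2 (swapA arr 1 1) 2 st)) := by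
  obtain ⟨res, vis⟩ := st
  rw [getPermA]
  norm_num [List.range', List.foldl_cons, List.foldl_nil]

theorem u4 (arr : List Int) (st : List Int × PySem.Set (Int × Int × Int × Int)) :
    getPermA 4 arr 0 st = getPermA 3 (swapA arr 0 3) 1 (getPermA 3 (swapA arr 0 2) 1 (getPermA 3 (swapA arr 0 1) 1 (getPermA 3 (swapA arr 0 0) 1 st))) := by
  obtain ⟨res, vis⟩ := st
  rw [getPermA]
  norm_num [List.range', List.foldl_cons, List.foldl_nil]

-- A's recursion, fully unrolled, is a fold of its leaf body over the 24 leaf lists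
theorem getPermA_eq_foldl (A B C D : Int) (st : List Int × PySem.Set (Int × Int × Int × Int)) :
    getPermA 4 [A, B, C, D] 0 st = (idxA.map (pickL A B C D)).foldl leafStep st := by
  simp only [u4, u3, u2, u1, uleaf, swapA, PySem.List.pySetD_natCast, PySem.List.pyGetD_natCast]
  norm_num [idxA, pickL, List.map_cons, List.map_nil, List.foldl_cons, List.foldl_nil,
    List.getD, List.set]

-- the running-total list simulates a plain counter
theorem sim (L : List (List Int)) (res : List Int) (vis : PySem.Set (Int × Int × Int × Int)) (c : Int)
    (h : PySem.List.pyGetD res (-1) 0 = c) :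
    PySem.List.pyGetD (L.foldl leafStep (res, vis)).1 (-1) 0 = (L.foldl gstep (vis, c)).2 := by
  induction L generalizing res vis c with
  | nil => simpa using h
  | cons arr L ih =>
    by_cases hm : PySem.Set.contains vis (tup4 arr)
    · simp only [List.foldl_cons, leafStep, gstep, hm, if_true]
      exact ih res vis c h
    · simp only [List.foldl_cons, leafStep, gstep, hm, h]
      exact ih _ _ _ (PySem.List.pyGetD_neg_one_append_singleton _ _ _)

-- replace list leaves by their tuples
theorem fold_gh (L : List (List Int)) (s : PySem.Set (Int × Int × Int × Int)) (c : Int)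
    (h : ∀ arr ∈ L, isValidA arr = isValidT (tup4 arr)) :
    L.foldl gstep (s, c) = (L.map tup4).foldl hstep (s, c) := by
  induction L generalizing s c with
  | nil => rfl
  | cons arr L ih =>
    have h1 : isValidA arr = isValidT (tup4 arr) := h arr (by simp)
    have h2 : ∀ a ∈ L, isValidA a = isValidT (tup4 a) := fun a ha => h a (by simp [ha])
    by_cases hm : PySem.Set.contains s (tup4 arr)
    · simp only [List.foldl_cons, List.map_cons, gstep, hstep, hm, if_true]
      exact ih s c h2
    · simp only [List.foldl_cons, List.map_cons, gstep, hstep, hm, h1]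
      exact ih _ _ h2

-- counting first occurrences is a sum over the distinct elements
theorem count_h (L : List (Int × Int × Int × Int)) (s : PySem.Set (Int × Int × Int × Int)) (c : Int) :
    (L.foldl hstep (s, c)).2 = c + ∑ t ∈ L.toFinset \ s.toFinset, isValidT t := by
  induction L generalizing s c with
  | nil => simp
  | cons t L ih =>
    rw [List.foldl_cons]
    by_cases hm : t ∈ s
    · have hstep1 : hstep (s, c) t = (s, c) := by
        unfold hstep
        rw [if_pos (show PySem.Set.contains s t = true by simpa using hm)]
      have hset : (t :: L).toFinset \ s.toFinset = L.toFinset \ s.toFinset := by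
        ext x
        simp only [List.toFinset_cons, Finset.mem_sdiff, Finset.mem_insert, List.mem_toFinset]
        constructor
        · rintro ⟨rfl | hx, hns⟩
          · exact absurd hm hns
          · exact ⟨hx, hns⟩
        · rintro ⟨hx, hns⟩; exact ⟨Or.inr hx, hns⟩
      rw [hstep1, ih, hset]
    · have hstep2 : hstep (s, c) t = (s ++ [t], c + isValidT t) := by
        unfold hstep
        rw [if_neg (show ¬ PySem.Set.contains s t = true by simpa using hm),
          PySem.Set.add_of_not_mem hm]
      rw [hstep2, ih]
      have hset : L.toFinset \ (s ++ [t]).toFinset = (L.toFinset \ s.toFinset).erase t := by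
        ext x
        simp only [Finset.mem_sdiff, List.toFinset_append, Finset.mem_union, List.mem_toFinset,
          Finset.mem_erase, List.toFinset_cons, List.toFinset_nil, insert_empty_eq,
          Finset.mem_insert, Finset.mem_singleton]
        tauto
      have hmem : t ∈ (t :: L).toFinset \ s.toFinset := by simp [hm]
      have hsum : ∑ x ∈ (t :: L).toFinset \ s.toFinset, isValidT x
          = isValidT t + ∑ x ∈ ((t :: L).toFinset \ s.toFinset).erase t, isValidT x :=
        (Finset.add_sum_erase _ _ hmem).symm
      have hErase : ((t :: L).toFinset \ s.toFinset).erase t = (L.toFinset \ s.toFinset).erase t := by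
        ext x
        simp only [Finset.mem_erase, Finset.mem_sdiff, List.toFinset_cons, Finset.mem_insert,
          List.mem_toFinset]
        tauto
      rw [hset, ← hErase, hsum]; ring

theorem perm_idx : idxA.Perm idxB := by decide

-- B's loops, fully unrolled, are a fold of hstep over the 24 kept tuples
def allQ : List (Nat × Nat × Nat × Nat) :=
  [(0, 0, 0, 0), (0, 0, 0, 1), (0, 0, 0, 2), (0, 0, 0, 3), (0, 0, 1, 0), (0, 0, 1, 1), (0, 0, 1, 2), (0, 0, 1, 3), (0, 0, 2, 0), (0, 0, 2, 1), (0, 0, 2, 2), (0, 0, 2, 3), (0, 0, 3, 0), (0, 0, 3, 1), (0, 0, 3, 2), (0, 0, 3, 3), (0, 1, 0, 0), (0, 1, 0, 1), (0, 1, 0, 2), (0, 1, 0, 3), (0, 1, 1, 0), (0, 1, 1, 1), (0, 1, 1, 2), (0, 1, 1, 3), (0, 1, 2, 0), (0, 1, 2, 1), (0, 1, 2, 2), (0, 1, 2, 3), (0, 1, 3, 0), (0, 1, 3, 1), (0, 1, 3, 2), (0, 1, 3, 3), (0, 2, 0, 0), (0, 2, 0, 1), (0, 2, 0, 2), (0,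 2, 0, 3), (0, 2, 1, 0), (0, 2, 1, 1), (0, 2, 1, 2), (0, 2, 1, 3), (0, 2, 2, 0), (0, 2, 2, 1), (0, 2, 2, 2), (0, 2, 2, 3), (0, 2, 3, 0), (0, 2, 3, 1), (0, 2, 3, 2), (0, 2, 3, 3), (0, 3, 0, 0), (0, 3, 0, 1), (0, 3, 0, 2), (0, 3, 0, 3), (0, 3, 1, 0), (0, 3, 1, 1), (0, 3, 1, 2), (0, 3, 1, 3), (0, 3, 2, 0), (0, 3, 2, 1), (0, 3, 2, 2), (0, 3, 2, 3), (0, 3, 3, 0), (0, 3, 3, 1), (0, 3, 3, 2), (0, 3, 3, 3), (1, 0, 0, 0), (1, 0, 0, 1), (1, 0, 0, 2), (1, 0, 0, 3), (1, 0, 1, 0), (1, 0, 1, 1), (1, 0, 1, 2), (1, 0, 1, 3), (1, 0, 2, 0), (1, 0, 2, 1), (1, 0, 2, 2), (1, 0, 2, 3), (1, 0, 3, 0), (1, 0, 3, 1), (1, 0, 3, 2), (1, 0, 3, 3), (1, 1, 0, 0), (1, 1, 0, 1), (1, 1, 0, 2), (1, 1, 0, 3), (1, 1, 1, 0), (1,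 1, 1, 1), (1, 1, 1, 2), (1, 1, 1, 3), (1, 1, 2, 0), (1, 1, 2, 1), (1, 1, 2, 2), (1, 1, 2, 3), (1, 1, 3, 0), (1, 1, 3, 1), (1, 1, 3, 2), (1, 1, 3, 3), (1, 2, 0, 0), (1, 2, 0, 1), (1, 2, 0, 2), (1, 2, 0, 3), (1, 2, 1, 0), (1, 2, 1, 1), (1, 2, 1, 2), (1, 2, 1, 3), (1, 2, 2, 0), (1, 2, 2, 1), (1, 2, 2, 2), (1, 2, 2, 3), (1, 2, 3, 0), (1, 2, 3, 1), (1, 2, 3, 2), (1, 2, 3, 3), (1, 3, 0, 0), (1, 3, 0, 1), (1, 3, 0, 2), (1, 3, 0, 3), (1, 3, 1, 0), (1, 3, 1, 1), (1, 3, 1, 2), (1, 3, 1, 3), (1, 3, 2, 0), (1, 3, 2, 1), (1, 3, 2, 2), (1, 3, 2, 3), (1, 3, 3, 0), (1, 3, 3, 1), (1, 3, 3, 2), (1, 3, 3, 3), (2, 0, 0, 0), (2, 0, 0, 1), (2, 0, 0, 2), (2, 0, 0, 3), (2, 0, 1, 0), (2, 0, 1, 1), (2, 0, 1, 2), (2,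 0, 1, 3), (2, 0, 2, 0), (2, 0, 2, 1), (2, 0, 2, 2), (2, 0, 2, 3), (2, 0, 3, 0), (2, 0, 3, 1), (2, 0, 3, 2), (2, 0, 3, 3), (2, 1, 0, 0), (2, 1, 0, 1), (2, 1, 0, 2), (2, 1, 0, 3), (2, 1, 1, 0), (2, 1, 1, 1), (2, 1, 1, 2), (2, 1, 1, 3), (2, 1, 2, 0), (2, 1, 2, 1), (2, 1, 2, 2), (2, 1, 2, 3), (2, 1, 3, 0), (2, 1, 3, 1), (2, 1, 3, 2), (2, 1, 3, 3), (2, 2, 0, 0), (2, 2, 0, 1), (2, 2, 0, 2), (2, 2, 0, 3), (2, 2, 1, 0), (2, 2, 1, 1), (2, 2, 1, 2), (2, 2, 1, 3), (2, 2, 2, 0), (2, 2, 2, 1), (2, 2, 2, 2), (2, 2, 2, 3), (2, 2, 3, 0), (2, 2, 3, 1), (2, 2, 3, 2), (2, 2, 3, 3), (2, 3, 0, 0), (2, 3, 0, 1), (2, 3, 0, 2), (2, 3, 0, 3), (2, 3, 1, 0), (2, 3, 1, 1), (2, 3, 1, 2), (2, 3, 1, 3), (2, 3, 2, 0), (2,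 3, 2, 1), (2, 3, 2, 2), (2, 3, 2, 3), (2, 3, 3, 0), (2, 3, 3, 1), (2, 3, 3, 2), (2, 3, 3, 3), (3, 0, 0, 0), (3, 0, 0, 1), (3, 0, 0, 2), (3, 0, 0, 3), (3, 0, 1, 0), (3, 0, 1, 1), (3, 0, 1, 2), (3, 0, 1, 3), (3, 0, 2, 0), (3, 0, 2, 1), (3, 0, 2, 2), (3, 0, 2, 3), (3, 0, 3, 0), (3, 0, 3, 1), (3, 0, 3, 2), (3, 0, 3, 3), (3, 1, 0, 0), (3, 1, 0, 1), (3, 1, 0, 2), (3, 1, 0, 3), (3, 1, 1, 0), (3, 1, 1, 1), (3, 1, 1, 2), (3, 1, 1, 3), (3, 1, 2, 0), (3, 1, 2, 1), (3, 1, 2, 2), (3, 1, 2, 3), (3, 1, 3, 0), (3, 1, 3, 1), (3, 1, 3, 2), (3, 1, 3, 3), (3, 2, 0, 0), (3, 2, 0, 1), (3, 2, 0, 2), (3, 2, 0, 3), (3, 2, 1, 0), (3, 2, 1, 1), (3, 2, 1, 2), (3, 2, 1, 3), (3, 2, 2, 0), (3, 2, 2, 1), (3, 2, 2, 2), (3,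 2, 2, 3), (3, 2, 3, 0), (3, 2, 3, 1), (3, 2, 3, 2), (3, 2, 3, 3), (3, 3, 0, 0), (3, 3, 0, 1), (3, 3, 0, 2), (3, 3, 0, 3), (3, 3, 1, 0), (3, 3, 1, 1), (3, 3, 1, 2), (3, 3, 1, 3), (3, 3, 2, 0), (3, 3, 2, 1), (3, 3, 2, 2), (3, 3, 2, 3), (3, 3, 3, 0), (3, 3, 3, 1), (3, 3, 3, 2), (3, 3, 3, 3)]

def qtup (ds : List Int) (q : Nat × Nat × Nat × Nat) : Int × Int × Int × Int :=
  (PySem.List.pyGetD ds (q.1 : Int) 0, PySem.List.pyGetD ds (q.2.1 : Int) 0,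
   PySem.List.pyGetD ds (q.2.2.1 : Int) 0, PySem.List.pyGetD ds (q.2.2.2 : Int) 0)

theorem stepB_characterize (ds : List Int) (i j k l : Nat) (st : PySem.Set (Int × Int × Int × Int) × Int) :
    stepB ds i j k l st =
      if PySem.Set.len (PySem.Set.ofList [i, j, k, l]) = 4 then hstep st (qtup ds (i, j, k, l))
      else st := by
  simp only [stepB, hstep, isValidT, qtup]
  split_ifs <;> simp_all

theorem fold_filter (ds : List Int) (Q : List (Nat × Nat × Nat × Nat))
    (st : PySem.Set (Int × Int × Int × Int) × Int) :
    Q.foldl (fun st q => stepB ds q.1 q.2.1 q.2.2.1 q.2.2.2 st) st =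
      ((Q.filter (fun q => decide (PySem.Set.len (PySem.Set.ofList [q.1, q.2.1, q.2.2.1, q.2.2.2]) = 4))).map
        (qtup ds)).foldl hstep st := by
  induction Q generalizing st with
  | nil => rfl
  | cons q Q ih =>
    rw [List.foldl_cons, stepB_characterize, List.filter_cons]
    by_cases h : PySem.Set.len (PySem.Set.ofList [q.1, q.2.1, q.2.2.1, q.2.2.2]) = 4
    · rw [if_pos h, if_pos (by simpa using h), List.map_cons, List.foldl_cons, ih]
    · rw [if_neg h, if_neg (by simpa using h), ih]

theorem foldl_nest {α β γ : Type} (L1 : List β) (L2 : List γ) (f : α → β → γ → α) (st : α) :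
    L1.foldl (fun st i => L2.foldl (fun st j => f st i j) st) st
      = (L1.flatMap (fun i => L2.map (Prod.mk i))).foldl (fun st q => f st q.1 q.2) st := by
  induction L1 generalizing st with
  | nil => rfl
  | cons i L1 ih =>
    simp only [List.flatMap_cons, List.foldl_append, List.foldl_cons, List.foldl_map, ih]

set_option maxRecDepth 100000 in
theorem altB_flat (A B C D : Int) :
    solution_alt A B C D =
      (allQ.foldl (fun st q => stepB [A, B, C, D] q.1 q.2.1 q.2.2.1 q.2.2.2 st)
        (PySem.Set.empty, 0)).2 := by
  simp only [solution_alt, foldl_nest]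
  congr 1

set_option maxRecDepth 8192 in
theorem altB_eq_foldl (A B C D : Int) :
    solution_alt A B C D = ((idxB.map (pickT A B C D)).foldl hstep (PySem.Set.empty, 0)).2 := by
  rw [altB_flat, fold_filter]
  rw [show allQ.filter (fun q => decide (PySem.Set.len (PySem.Set.ofList [q.1, q.2.1, q.2.2.1, q.2.2.2]) = 4)) = idxB from by decide]
  rw [show idxB.map (qtup [A, B, C, D]) = idxB.map (pickT A B C D) from rfl]

theorem main_eq (A B C D : Int) : solution A B C D = solution_alt A B C D := by
  have hvalid : ∀ arr ∈ idxA.map (pickL A B C D), isValidA arr = isValidT (tup4 arr) := by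
    intro arr h
    fin_cases h <;> rfl
  have hA : solution A B C D = ((idxA.map (pickL A B C D)).foldl gstep (PySem.Set.empty, 0)).2 := by
    show PySem.List.pyGetD (getPermA 4 [A, B, C, D] 0 ([0], PySem.Set.empty)).1 (-1) 0 = _
    rw [getPermA_eq_foldl]
    exact sim _ [0] PySem.Set.empty 0 rfl
  rw [hA, fold_gh _ _ _ hvalid, altB_eq_foldl, count_h, count_h, List.map_map]
  have h1 : (tup4 ∘ pickL A B C D) = pickT A B C D := rfl
  rw [h1, List.toFinset_eq_of_perm _ _ (perm_idx.map (pickT A B C D))]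

-- ===== VERDICT (by name: the statement is the Claim_ definition above) =====
theorem solution_spec : Claim_equal_solution := by
  intro A B C D _
  unfold Spec_solution
  exact main_eq A B C D
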